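-- pv_equiv track=rewrite | github.com/ryandkuster/ngsComposer | tools/scallop.py | viewfinder
-- ===== SOURCE A (Python) =====
-- def viewfinder(line, good_ls, window):
--     for i in range(len(line) - window, -1, -1):
--         for pos, j in enumerate(line[i:i+window]):
--             if j not in good_ls:
--                 break
--             elif pos == window - 1:
--                 return i+window
--     return 0
-- ===== SOURCE B (Python) =====
-- def viewfinder(line, good_ls, window):
--     if window <= 0:
--         return 0
--     good = set(good_ls)
--     count = 0
--     for idx in range(len(line) - 1, -1, -1):
--         if line[idx] in good:
--             count += 1
--             if count == window:
--                 return idx + window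
--         else:
--             count = 0
--     return 0
-- ===== Notes on version B (the rewrite author's own statement) =====
-- stated objective: faster
-- what changed: Replaced the nested rescan of every candidate window (for each start position, re-check all window characters) by a single right-to-left pass that counts consecutive good characters and returns as soon as the streak reaches the window length, with set membership instead of a list scan per character.
import Mathlib
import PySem

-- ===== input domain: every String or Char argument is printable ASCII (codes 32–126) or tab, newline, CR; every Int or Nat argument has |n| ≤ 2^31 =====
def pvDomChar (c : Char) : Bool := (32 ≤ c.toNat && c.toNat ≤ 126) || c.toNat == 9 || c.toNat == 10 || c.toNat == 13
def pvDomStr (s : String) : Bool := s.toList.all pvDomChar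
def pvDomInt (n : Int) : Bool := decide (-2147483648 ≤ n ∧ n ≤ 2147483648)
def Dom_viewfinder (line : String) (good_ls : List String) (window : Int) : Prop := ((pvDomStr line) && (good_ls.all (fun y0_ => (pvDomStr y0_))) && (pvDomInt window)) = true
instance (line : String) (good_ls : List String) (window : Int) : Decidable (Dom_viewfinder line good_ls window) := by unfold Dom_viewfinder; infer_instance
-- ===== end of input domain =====

-- B replaces A's per-start rescan of the whole window by one right-to-left pass
-- counting consecutive good characters (objective: faster, asymptotic).

-- ===== PORT A =====
-- inner loop: for pos, j in enumerate(line[i:i+window]): break on bad char, return (true) at pos == window-1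
def pvInnerA (good_ls : List String) (window : Int) : List Char → Int → Bool
  | [], _ => false
  | c :: rest, pos =>
    if ¬ (good_ls.contains (String.ofList [c])) then false
    else if pos = window - 1 then true
    else pvInnerA good_ls window rest (pos + 1)

-- outer loop over i in range(len(line)-window, -1, -1)
def pvOuterA (cs : List Char) (good_ls : List String) (window : Int) : List Int → Int
  | [] => 0
  | i :: rest =>
    if pvInnerA good_ls window (PySem.List.slice cs (some i) (some (i + window))) 0 then i + window
    else pvOuterA cs good_ls window rest

def viewfinder (line : String) (good_ls : List String) (window : Int) : Int :=
  pvOuterA line.toList good_ls window (PySem.List.pyRange ((line.toList.length : Int) - window) (-1) (-1))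

-- ===== PORT B =====
-- single right-to-left pass: walk the reversed character list with the current index,
-- counting consecutive good characters; return idx+window when the streak reaches window
def pvGoB (good : PySem.Set String) (window : Int) : List Char → Int → Int → Int
  | [], _, _ => 0
  | c :: rest, idx, count =>
    if PySem.Set.contains good (String.ofList [c]) then
      if count + 1 = window then idx + window
      else pvGoB good window rest (idx - 1) (count + 1)
    else pvGoB good window rest (idx - 1) 0

def viewfinder_alt (line : String) (good_ls : List String) (window : Int) : Int :=
  if window ≤ 0 then 0
  else pvGoB (PySem.Set.ofList good_ls) window line.toList.reverse ((line.toList.length : Int) - 1) 0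

-- ===== PRECONDITION & SPEC =====
def Spec_viewfinder (line : String) (good_ls : List String) (window : Int) (out : Int) : Prop := out = viewfinder_alt line good_ls window
instance (line : String) (good_ls : List String) (window : Int) (out : Int) : Decidable (Spec_viewfinder line good_ls window out) := by unfold Spec_viewfinder; infer_instance

-- ===== CLAIM (what is proved, stated in full; the proofs are below) =====
def Claim_equal_viewfinder : Prop := ∀ (line : String) (good_ls : List String) (window : Int), Dom_viewfinder line good_ls window → Spec_viewfinder line good_ls window (viewfinder line good_ls window)

-- ===== LEMMAS AND PROOFS =====

-- the per-character test both programs use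
def pvG (good_ls : List String) (c : Char) : Bool := good_ls.contains (String.ofList [c])

-- "positions j .. j+w-1 all good and in range", the condition both loops decide
def pvP (cs : List Char) (good_ls : List String) (w : Nat) (j : Nat) : Bool :=
  decide (j + w ≤ cs.length) && ((cs.drop j).take w).all (pvG good_ls)

-- first index from the top satisfying p, scanning m-1, m-2, ..., 0
def pvFdesc (p : Nat → Bool) : Nat → Option Nat
  | 0 => none
  | m + 1 => if p m then some m else pvFdesc p m

def pvRes (window : Int) : Option Nat → Int
  | some j => (j : Int) + window
  | none => 0

theorem pvFdesc_none (p : Nat → Bool) (m : Nat) (h : ∀ j, j < m → p j = false) :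
    pvFdesc p m = none := by
  induction m with
  | zero => rfl
  | succ m ih => simp [pvFdesc, h m (Nat.lt_succ_self m), ih (fun j hj => h j (Nat.lt_succ_of_lt hj))]

theorem pvFdesc_skip (p : Nat → Bool) (m m' : Nat) (hle : m' ≤ m)
    (h : ∀ j, m' ≤ j → j < m → p j = false) : pvFdesc p m = pvFdesc p m' := by
  induction m with
  | zero => cases Nat.le_zero.mp hle; rfl
  | succ m ih =>
    rcases Nat.lt_or_ge m' (m + 1) with hlt | hge
    · have hm : m' ≤ m := Nat.lt_succ_iff.mp hlt
      simp [pvFdesc, h m hm (Nat.lt_succ_self m),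
        ih hm (fun j h1 h2 => h j h1 (Nat.lt_succ_of_lt h2))]
    · have : m' = m + 1 := le_antisymm hle hge
      simp [this]

theorem pv_all_iff (cs : List Char) (g : Char → Bool) (j w : Nat) (h : j + w ≤ cs.length) :
    (((cs.drop j).take w).all g = true) ↔ ∀ t, j ≤ t → t < j + w → g (cs.getD t ' ') = true := by
  have hlen : ((cs.drop j).take w).length = w := by simp; omega
  have helem : ∀ (k : Nat) (hk : k < w), ((cs.drop j).take w)[k]'(by omega) = cs[j + k]'(by omega) := by
    intro k hk
    simp [List.getElem_take, List.getElem_drop]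
  rw [List.all_eq_true]
  constructor
  · intro hall t ht1 ht2
    have hlt : t < cs.length := by omega
    rw [List.getD_eq_getElem cs ' ' hlt]
    have hk : t - j < w := by omega
    have he : ((cs.drop j).take w)[t - j]'(by omega) = cs[t]'hlt := by
      rw [helem (t - j) hk]
      congr 1
      omega
    rw [← he]
    exact hall _ (List.getElem_mem _)
  · intro hgood x hx
    obtain ⟨k, hk, hxe⟩ := List.mem_iff_getElem.mp hx
    have hkw : k < w := by omega
    have := helem k hkw
    have hlt : j + k < cs.length := by omega
    have hg := hgood (j + k) (by omega) (by omega)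
    rw [List.getD_eq_getElem cs ' ' hlt] at hg
    rw [← hxe, helem k hkw]
    exact hg

-- with a nonpositive window the inner loop can never reach pos == window-1
theorem pvInnerA_false (good_ls : List String) (window : Int) (hw : window ≤ 0) :
    ∀ (chars : List Char) (pos : Int), 0 ≤ pos →
    pvInnerA good_ls window chars pos = false := by
  intro chars
  induction chars with
  | nil => intro pos _; rfl
  | cons c rest ih =>
    intro pos hpos
    have hne : ¬ (pos = window - 1) := by omega
    by_cases hg : good_ls.contains (String.ofList [c])
    · have hmem : String.ofList [c] ∈ good_ls := List.contains_iff_mem.mp hg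
      rw [show pvInnerA good_ls window (c :: rest) pos = pvInnerA good_ls window rest (pos + 1)
        from by simp [pvInnerA, hmem, hne]]
      exact ih (pos + 1) (by omega)
    · have hmem : ¬ String.ofList [c] ∈ good_ls := fun h => hg (List.contains_iff_mem.mpr h)
      rw [show pvInnerA good_ls window (c :: rest) pos = false from by simp [pvInnerA, hmem]]

theorem pvInnerA_char (good_ls : List String) (window : Int) :
    ∀ (chars : List Char) (pos : Int) (m : Nat), 1 ≤ m → window - pos = (m : Int) →
    pvInnerA good_ls window chars pos
      = (decide (m ≤ chars.length) && (chars.take m).all (pvG good_ls)) := by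
  intro chars
  induction chars with
  | nil =>
    intro pos m h1 _
    simp [pvInnerA]
    omega
  | cons c rest ih =>
    intro pos m h1 hm
    obtain ⟨k, rfl⟩ : ∃ k, m = k + 1 := ⟨m - 1, by omega⟩
    by_cases hg : good_ls.contains (String.ofList [c])
    · have hmem : String.ofList [c] ∈ good_ls := List.contains_iff_mem.mp hg
      by_cases hpos : pos = window - 1
      · have hk0 : k = 0 := by omega
        subst hk0
        simp [pvInnerA, hpos, pvG, List.contains_iff_mem, hmem]
      · have hk1 : 1 ≤ k := by omega
        have hrec := ih (pos + 1) k hk1 (by omega)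
        have hstep : pvInnerA good_ls window (c :: rest) pos
            = pvInnerA good_ls window rest (pos + 1) := by
          simp [pvInnerA, hmem, hpos]
        have hiff : (k ≤ rest.length) ↔ (k + 1 ≤ rest.length + 1) := by omega
        have hgc : pvG good_ls c = true := hg
        rw [hstep, hrec]
        simp only [List.take_succ_cons, List.all_cons, hgc, Bool.true_and, List.length_cons]
        congr 1
        exact decide_eq_decide.mpr hiff
    · have hmem : ¬ String.ofList [c] ∈ good_ls := fun h => hg (List.contains_iff_mem.mpr h)
      have hgc : pvG good_ls c = false := by simpa [pvG, List.contains_iff_mem] using hmem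
      rw [show pvInnerA good_ls window (c :: rest) pos = false from by simp [pvInnerA, hmem]]
      simp [hgc]

theorem pvOuterA_zero (cs : List Char) (good_ls : List String) (window : Int)
    (hw : window ≤ 0) : ∀ l : List Int, pvOuterA cs good_ls window l = 0 := by
  intro l
  induction l with
  | nil => rfl
  | cons i rest ih =>
    simp [pvOuterA, pvInnerA_false good_ls window hw _ 0 le_rfl, ih]

theorem pvOuterA_char (cs : List Char) (good_ls : List String) (window : Int) (w : Nat)
    (h1 : 1 ≤ w) (hw : window = (w : Int)) (hwn : w ≤ cs.length) :
    ∀ m : Nat, m ≤ cs.length - w + 1 →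
    pvOuterA cs good_ls window (PySem.List.pyRange ((m : Int) - 1) (-1) (-1))
      = pvRes window (pvFdesc (pvP cs good_ls w) m) := by
  intro m
  induction m with
  | zero =>
    intro _
    rw [PySem.List.pyRange_neg_one_eq_nil (by norm_num)]
    rfl
  | succ m ih =>
    intro hm
    have hmle : m ≤ cs.length - w := by omega
    have hcast : ((m + 1 : Nat) : Int) - 1 = (m : Nat) := by push_cast; ring
    rw [hcast, PySem.List.pyRange_neg_one_cons (by omega)]
    show (if pvInnerA good_ls window
        (PySem.List.slice cs (some ((m : Nat) : Int)) (some (((m : Nat) : Int) + window))) 0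
      then ((m : Nat) : Int) + window
      else pvOuterA cs good_ls window (PySem.List.pyRange (((m : Nat) : Int) - 1) (-1) (-1)))
      = pvRes window (pvFdesc (pvP cs good_ls w) (m + 1))
    rw [hw, PySem.List.slice_natCast_add cs m w]
    have hlen : ((cs.drop m).take w).length = w := by simp; omega
    have htake : ((cs.drop m).take w).take w = (cs.drop m).take w := by
      rw [List.take_of_length_le (by omega)]
    rw [pvInnerA_char good_ls ((w : Nat) : Int) _ 0 w h1 (by push_cast; ring)]
    rw [hlen, htake]
    have hcond : (decide (w ≤ w) && ((cs.drop m).take w).all (pvG good_ls))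
        = pvP cs good_ls w m := by
      simp [pvP]
      omega
    rw [hcond]
    by_cases hp : pvP cs good_ls w m = true
    · simp [pvFdesc, hp, pvRes, hw]
    · rw [Bool.not_eq_true] at hp
      simp only [hp, Bool.false_eq_true, if_false, pvFdesc]
      rw [← hw]
      exact ih (by omega)

theorem pvGoB_char (cs : List Char) (good_ls : List String) (window : Int) (w : Nat)
    (h1 : 1 ≤ w) (hw : window = (w : Int)) :
    ∀ (m : Nat), m ≤ cs.length → ∀ (count : Nat),
    count < w → m + count ≤ cs.length →
    (∀ t, m ≤ t → t < m + count → pvG good_ls (cs.getD t ' ') = true) →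
    (m + count = cs.length ∨ pvG good_ls (cs.getD (m + count) ' ') = false) →
    pvGoB (PySem.Set.ofList good_ls) window ((cs.take m).reverse) ((m : Int) - 1) (count : Int)
      = pvRes window (pvFdesc (pvP cs good_ls w) m) := by
  intro m
  induction m with
  | zero =>
    intro _ count _ _ _ _
    simp [pvGoB, pvFdesc, pvRes]
  | succ m ih =>
    intro hm1 count hcw hmc hstreak hexact
    have hmlt : m < cs.length := by omega
    have htake : (cs.take (m + 1)).reverse = cs[m] :: (cs.take m).reverse := by
      rw [List.take_add_one, List.getElem?_eq_getElem hmlt]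
      simp
    have hidx : ((m + 1 : Nat) : Int) - 1 - 1 = ((m : Nat) : Int) - 1 := by push_cast; ring
    rw [htake]
    by_cases hg : pvG good_ls (cs[m]'hmlt) = true
    · have hmem : String.ofList [cs[m]'hmlt] ∈ good_ls :=
        List.contains_iff_mem.mp (by simpa [pvG] using hg)
      by_cases heq : (count : Int) + 1 = window
      · have hcw' : count + 1 = w := by omega
        have hbound : m + w ≤ cs.length := by omega
        have hall : ((cs.drop m).take w).all (pvG good_ls) = true := by
          rw [pv_all_iff cs (pvG good_ls) m w hbound]
          intro t ht1 ht2
          rcases eq_or_lt_of_le ht1 with rfl | hlt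
          · rw [List.getD_eq_getElem cs ' ' hmlt]; exact hg
          · exact hstreak t (by omega) (by omega)
        have hpm : pvP cs good_ls w m = true := by
          simp [pvP, hall]; omega
        rw [show pvGoB (PySem.Set.ofList good_ls) window (cs[m]'hmlt :: (cs.take m).reverse)
              (((m + 1 : Nat) : Int) - 1) (count : Int) = ((m + 1 : Nat) : Int) - 1 + window
            from by simp [pvGoB, hmem, heq]]
        simp [pvFdesc, hpm, pvRes]
      · have hcnext : count + 1 < w := by omega
        have hstreak' : ∀ t, m ≤ t → t < m + (count + 1) → pvG good_ls (cs.getD t ' ') = true := by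
          intro t ht1 ht2
          rcases eq_or_lt_of_le ht1 with rfl | hlt
          · rw [List.getD_eq_getElem cs ' ' hmlt]; exact hg
          · exact hstreak t (by omega) (by omega)
        have hexact' : m + (count + 1) = cs.length ∨ pvG good_ls (cs.getD (m + (count + 1)) ' ') = false := by
          rcases hexact with he | he
          · exact Or.inl (by omega)
          · exact Or.inr (by rwa [show m + (count + 1) = m + 1 + count from by ring])
        have hrec := ih (by omega) (count + 1) hcnext (by omega) hstreak' hexact'
        have hpm : pvP cs good_ls w m = false := by
          by_cases hbound : m + w ≤ cs.length
          · rcases hexact with he | he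
            · exfalso; omega
            · have hf : ¬ (((cs.drop m).take w).all (pvG good_ls) = true) := by
                rw [pv_all_iff cs (pvG good_ls) m w hbound]
                intro hforall
                have := hforall (m + 1 + count) (by omega) (by omega)
                rw [this] at he
                exact Bool.true_eq_false.mp he
              simp [pvP, Bool.eq_false_iff.mpr hf]
          · simp [pvP]; omega
        rw [show pvGoB (PySem.Set.ofList good_ls) window (cs[m]'hmlt :: (cs.take m).reverse)
              (((m + 1 : Nat) : Int) - 1) (count : Int)
            = pvGoB (PySem.Set.ofList good_ls) window ((cs.take m).reverse)
              (((m + 1 : Nat) : Int) - 1 - 1) ((count : Int) + 1)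
            from by simp [pvGoB, hmem, heq]]
        rw [hidx, show ((count : Int) + 1) = ((count + 1 : Nat) : Int) from by push_cast; ring, hrec]
        simp [pvFdesc, hpm]
    · have hgf : pvG good_ls (cs[m]'hmlt) = false := Bool.eq_false_iff.mpr hg
      have hmem : ¬ String.ofList [cs[m]'hmlt] ∈ good_ls := by
        intro h
        rw [show pvG good_ls (cs[m]'hmlt) = good_ls.contains (String.ofList [cs[m]'hmlt]) from rfl,
          List.contains_iff_mem] at hg
        exact hg h
      have hexact' : m + 0 = cs.length ∨ pvG good_ls (cs.getD (m + 0) ' ') = false := by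
        refine Or.inr ?_
        rw [show m + 0 = m from by ring, List.getD_eq_getElem cs ' ' hmlt]
        exact hgf
      have hrec := ih (by omega) 0 (by omega) (by omega) (by intro t h1 h2; omega) hexact'
      have hpm : pvP cs good_ls w m = false := by
        by_cases hbound : m + w ≤ cs.length
        · have hf : ¬ (((cs.drop m).take w).all (pvG good_ls) = true) := by
            rw [pv_all_iff cs (pvG good_ls) m w hbound]
            intro hforall
            have := hforall m (by omega) (by omega)
            rw [List.getD_eq_getElem cs ' ' hmlt, hgf] at this
            exact Bool.false_eq_true.mp this
          simp [pvP, Bool.eq_false_iff.mpr hf]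
        · simp [pvP]; omega
      rw [show pvGoB (PySem.Set.ofList good_ls) window (cs[m]'hmlt :: (cs.take m).reverse)
            (((m + 1 : Nat) : Int) - 1) (count : Int)
          = pvGoB (PySem.Set.ofList good_ls) window ((cs.take m).reverse)
            (((m + 1 : Nat) : Int) - 1 - 1) 0
          from by simp [pvGoB, hmem]]
      rw [hidx, show (0 : Int) = ((0 : Nat) : Int) from rfl, hrec]
      simp [pvFdesc, hpm]

-- ===== VERDICT (by name: the statement is the Claim_ definition above) =====
theorem viewfinder_spec : Claim_equal_viewfinder := by
  intro line good_ls window _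
  unfold Spec_viewfinder viewfinder viewfinder_alt
  set cs := line.toList with hcs
  by_cases hw0 : window ≤ 0
  · simp [hw0, pvOuterA_zero cs good_ls window hw0]
  · have hwpos : 1 ≤ window := by omega
    have hwc : window = ((window.toNat : Nat) : Int) := by omega
    have h1 : 1 ≤ window.toNat := by omega
    rw [if_neg hw0]
    have hB := pvGoB_char cs good_ls window window.toNat h1 hwc
      cs.length le_rfl 0 (by omega) (by omega) (by intro t h1' h2'; omega)
      (Or.inl (by omega))
    rw [List.take_length] at hB
    have hB' : pvGoB (PySem.Set.ofList good_ls) window cs.reverse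
        ((cs.length : Int) - 1) 0
        = pvRes window (pvFdesc (pvP cs good_ls window.toNat) cs.length) := by
      simpa using hB
    rw [hB']
    by_cases hn : window.toNat ≤ cs.length
    · have hA := pvOuterA_char cs good_ls window window.toNat h1 hwc hn
        (cs.length - window.toNat + 1) le_rfl
      have hstart : ((cs.length - window.toNat + 1 : Nat) : Int) - 1
          = (cs.length : Int) - window := by
        rw [Nat.cast_add, Nat.cast_sub hn]
        push_cast
        omega
      rw [hstart] at hA
      rw [hA]
      congr 1
      have hle2 : cs.length - window.toNat + 1 ≤ cs.length := by omega
      refine (pvFdesc_skip _ cs.length _ hle2 ?_).symm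
      intro j hj1 hj2
      have hb : ¬ (j + window.toNat ≤ cs.length) := by omega
      simp [pvP, hb]
    · rw [PySem.List.pyRange_neg_one_eq_nil (by omega)]
      rw [pvFdesc_none _ _ (fun j hj => by
        have hb : ¬ (j + window.toNat ≤ cs.length) := by omega
        simp [pvP, hb])]
      rfl
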